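-- pv_equiv track=rewrite | github.com/Koliham/SQLNetwNQL | sqlnet/model/sqlnet.py | generate_gt_where_seq
-- ===== SOURCE A (Python) =====
-- def generate_gt_where_seq(q, col, query):
--     ret_seq = []
--     for cur_q, cur_col, cur_query in zip(q, col, query):
--         cur_values = []
--         st = cur_query.index('WHERE')+1 if \
--                 'WHERE' in cur_query else len(cur_query)
--         all_toks = ['<BEG>'] + cur_q + ['<END>']
--         while st < len(cur_query):
--             ed = len(cur_query) if 'AND' not in cur_query[st:]\
--                     else cur_query[st:].index('AND') + st
--             if 'EQL' in cur_query[st:ed]: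
--                 op = cur_query[st:ed].index('EQL') + st
--             elif 'GT' in cur_query[st:ed]:
--                 op = cur_query[st:ed].index('GT') + st
--             elif 'LT' in cur_query[st:ed]:
--                 op = cur_query[st:ed].index('LT') + st
--             else:
--                 raise RuntimeError("No operator in it!")
--             this_str = ['<BEG>'] + cur_query[op+1:ed] + ['<END>']
--             cur_seq = [all_toks.index(s) if s in all_toks \
--                     else 0 for s in this_str]
--             cur_values.append(cur_seq)
--             st = ed+1
--         ret_seq.append(cur_values)
--     return ret_seq
-- ===== SOURCE B (Python) =====
-- def generate_gt_where_seq(q, col, query):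
--     ret_seq = []
--     for cur_q, cur_col, cur_query in zip(q, col, query):
--         all_toks = ['<BEG>'] + cur_q + ['<END>']
--         pos = {}
--         for i, s in enumerate(all_toks):
--             pos.setdefault(s, i)
--         if 'WHERE' in cur_query:
--             tokens = cur_query[cur_query.index('WHERE') + 1:]
--         else:
--             tokens = []
--         groups = []
--         g = []
--         for tok in tokens:
--             if tok == 'AND':
--                 groups.append(g)
--                 g = []
--             else:
--                 g.append(tok)
--         if g:
--             groups.append(g)
--         cur_values = []
--         for g in groups:
--             op = None
--             for cand in ('EQL', 'GT', 'LT'):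
--                 if cand in g:
--                     op = g.index(cand)
--                     break
--             if op is None:
--                 raise RuntimeError("No operator in it!")
--             this_str = ['<BEG>'] + g[op + 1:] + ['<END>']
--             cur_values.append([pos.get(s, 0) for s in this_str])
--         ret_seq.append(cur_values)
--     return ret_seq
-- ===== Notes on version B (the rewrite author's own statement) =====
-- stated objective: alternative
-- what changed: Replaces A's pointer-advancing while loop with its repeated slicing and in/.index scans by a single-pass split of the post-WHERE tokens into AND-delimited groups plus a first-occurrence position dictionary for the question tokens built once per query.
import Mathlib
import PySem

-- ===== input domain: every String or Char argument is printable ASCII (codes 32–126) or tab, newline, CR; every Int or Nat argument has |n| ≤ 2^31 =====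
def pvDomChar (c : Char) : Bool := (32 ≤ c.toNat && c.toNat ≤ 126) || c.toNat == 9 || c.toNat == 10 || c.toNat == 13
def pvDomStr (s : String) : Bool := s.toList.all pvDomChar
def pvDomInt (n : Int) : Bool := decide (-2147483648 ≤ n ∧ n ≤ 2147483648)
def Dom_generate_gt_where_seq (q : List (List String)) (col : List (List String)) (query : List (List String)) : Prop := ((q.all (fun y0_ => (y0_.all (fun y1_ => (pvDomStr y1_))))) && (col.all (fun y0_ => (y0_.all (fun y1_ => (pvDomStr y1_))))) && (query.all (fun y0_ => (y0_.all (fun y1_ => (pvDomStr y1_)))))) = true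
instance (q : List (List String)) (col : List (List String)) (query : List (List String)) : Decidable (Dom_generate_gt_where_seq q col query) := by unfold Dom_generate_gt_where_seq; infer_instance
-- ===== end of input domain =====

-- B replaces A's pointer-advancing while loop (repeated slicing + list.index scans) by a single-pass
-- split of the post-WHERE tokens into AND-delimited groups and a first-occurrence position dictionary
-- for the question tokens, removing the repeated all_toks.index scans (objective: alternative decomposition).

-- ===== PORT A =====
-- Python 'all_toks.index(s) if s in all_toks else 0'  (index? is some exactly when s ∈ all_toks)
def pvA_tok (all_toks : List String) (s : String) : Int :=
  match PySem.List.index? all_toks s with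
  | some k => (k : Int)
  | none => 0

-- A's while loop, ported over the suffix rest = cur_query[st:]; the slices cur_query[st:ed] and the
-- advance st = ed+1 become take/drop on that suffix (exact same values).
def pvA_loop (all_toks : List String) : List String → List (List Int)
  | [] => []            -- st ≥ len(cur_query): loop ends
  | t :: ts =>
    let rest := t :: ts
    let ed : Nat := match PySem.List.index? rest "AND" with
      | some k => k
      | none => rest.length
    let seg := rest.take ed            -- cur_query[st:ed]
    let op? : Option Nat :=
      if "EQL" ∈ seg then PySem.List.index? seg "EQL"
      else if "GT" ∈ seg then PySem.List.index? seg "GT"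
      else if "LT" ∈ seg then PySem.List.index? seg "LT"
      else none
    match op? with
    | none => []        -- Python: raise RuntimeError("No operator in it!"); excluded by Pre_
    | some op =>
      let this_str := "<BEG>" :: (seg.drop (op + 1) ++ ["<END>"])
      (this_str.map (pvA_tok all_toks)) :: pvA_loop all_toks (rest.drop (ed + 1))
  termination_by l => l.length
  decreasing_by simp

def generate_gt_where_seq (q : List (List String)) (col : List (List String)) (query : List (List String)) : List (List (List Int)) :=
  (q.zip (col.zip query)).foldl (fun ret_seq x =>
    let cur_q := x.1
    let cur_query := x.2.2
    let all_toks := "<BEG>" :: (cur_q ++ ["<END>"])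
    -- st = cur_query.index('WHERE')+1 if 'WHERE' in cur_query else len(cur_query); loop over cur_query[st:]
    let rest := match PySem.List.index? cur_query "WHERE" with
      | some i => cur_query.drop (i + 1)
      | none => cur_query.drop cur_query.length
    ret_seq ++ [pvA_loop all_toks rest]) []

-- ===== PORT B =====
-- pos = {}; for i, s in enumerate(all_toks): pos.setdefault(s, i)
def pvB_pos (all_toks : List String) : PySem.Dict String Int :=
  (PySem.List.enumerate all_toks 0).foldl (fun d p => d.setdefault p.2 p.1) PySem.Dict.empty

-- one condition group: first-match priority EQL, GT, LT; none = Python raise RuntimeError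
def pvB_group (pos : PySem.Dict String Int) (g : List String) : Option (List Int) :=
  match ["EQL", "GT", "LT"].findSome? (fun cand => if cand ∈ g then PySem.List.index? g cand else none) with
  | none => none
  | some op => some (("<BEG>" :: (g.drop (op + 1) ++ ["<END>"])).map (fun s => pos.getD s 0))

def pvB_vals (pos : PySem.Dict String Int) : List (List String) → List (List Int)
  | [] => []
  | g :: gs =>
    match pvB_group pos g with
    | none => []        -- Python: raise RuntimeError("No operator in it!"); excluded by Pre_
    | some seq => seq :: pvB_vals pos gs

def generate_gt_where_seq_alt (q : List (List String)) (col : List (List String)) (query : List (List String)) : List (List (List Int)) :=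
  (q.zip (col.zip query)).foldl (fun ret_seq x =>
    let all_toks := "<BEG>" :: (x.1 ++ ["<END>"])
    let pos := pvB_pos all_toks
    let tokens : List String := match PySem.List.index? x.2.2 "WHERE" with
      | some i => x.2.2.drop (i + 1)
      | none => []
    -- single pass: split tokens into groups at every 'AND'
    let st := tokens.foldl (fun (st : List (List String) × List String) tok =>
      if tok = "AND" then (st.1 ++ [st.2], []) else (st.1, st.2 ++ [tok])) ([], [])
    let groups := if st.2.isEmpty then st.1 else st.1 ++ [st.2]
    ret_seq ++ [pvB_vals pos groups]) []

-- ===== PRECONDITION & SPEC =====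
-- helpers for stating Pre_: the tokens after 'WHERE' and their AND-delimited groups
def pvTokens (cur_query : List String) : List String :=
  match PySem.List.index? cur_query "WHERE" with
  | some i => cur_query.drop (i + 1)
  | none => []

def pvGroupsAux : List String → List String → List (List String)
  | g, [] => if g = [] then [] else [g]
  | g, tok :: t => if tok = "AND" then g :: pvGroupsAux [] t else pvGroupsAux (g ++ [tok]) t

-- Pre_ excludes exactly the inputs on which A raises RuntimeError("No operator in it!"): some
-- AND-delimited condition group after 'WHERE' contains none of 'EQL'/'GT'/'LT'. (B raises there too.)
def Pre_generate_gt_where_seq (q : List (List String)) (col : List (List String)) (query : List (List String)) : Prop :=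
  ∀ x ∈ q.zip (col.zip query), ∀ g ∈ pvGroupsAux [] (pvTokens x.2.2), ("EQL" ∈ g ∨ "GT" ∈ g ∨ "LT" ∈ g)
instance (q : List (List String)) (col : List (List String)) (query : List (List String)) : Decidable (Pre_generate_gt_where_seq q col query) := by unfold Pre_generate_gt_where_seq; infer_instance

def pvWitness_generate_gt_where_seq : List (List String) × List (List String) × List (List String) :=
  ([["what", "city"]], [["name", "city"]], [["SELECT", "name", "WHERE", "city", "EQL", "city", "AND", "name", "GT", "7"]])

def Spec_generate_gt_where_seq (q : List (List String)) (col : List (List String)) (query : List (List String)) (out : List (List (List Int))) : Prop := out = generate_gt_where_seq_alt q col query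
instance (q : List (List String)) (col : List (List String)) (query : List (List String)) (out : List (List (List Int))) : Decidable (Spec_generate_gt_where_seq q col query out) := by unfold Spec_generate_gt_where_seq; infer_instance

-- ===== CLAIM (what is proved, stated in full; the proofs are below) =====
def Claim_equal_generate_gt_where_seq : Prop := ∀ (q : List (List String)) (col : List (List String)) (query : List (List String)), Dom_generate_gt_where_seq q col query → Pre_generate_gt_where_seq q col query → Spec_generate_gt_where_seq q col query (generate_gt_where_seq q col query)

-- ===== LEMMAS AND PROOFS =====

-- setdefault in closed form
lemma pv_setdefault_eq {κ ν : Type} [BEq κ] [LawfulBEq κ] (d : PySem.Dict κ ν) (k : κ) (v : ν) :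
    d.setdefault k v = if d.contains k then d else d.insert k v := by
  by_cases h : d.contains k = true
  · simp [PySem.Dict.setdefault, h]
  · have h' : d.contains k = false := by simpa using h
    apply PySem.Dict.ext
    simp [PySem.Dict.setdefault, h', PySem.Dict.items_insert_of_not_contains]
-- the position dictionary records the FIRST index of each token
lemma pv_pos_foldl (s : String) : ∀ (l : List String) (st : Int) (d : PySem.Dict String Int),
    ((PySem.List.enumerate l st).foldl (fun d p => d.setdefault p.2 p.1) d).getD s 0 =
      if d.contains s then d.getD s 0
      else match PySem.List.index? l s with
        | some k => st + k
        | none => 0 := by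
  intro l
  induction l with
  | nil =>
    intro st d
    simp only [PySem.List.enumerate_nil, List.foldl_nil,]
    split
    · rfl
    · rename_i h
      exact PySem.Dict.getD_of_not_contains _ _ (by simpa using h)
  | cons x t ih =>
    intro st d
    rw [PySem.List.enumerate_cons]
    simp only [List.foldl_cons]
    rw [ih (st + 1) (d.setdefault x st)]
    by_cases hxs : x = s
    · subst hxs
      rw [pv_setdefault_eq]
      rw [PySem.List.index?_cons_self]
      by_cases hc : d.contains x = true
      · simp [hc]
      · simp [hc, PySem.Dict.contains_insert_self, PySem.Dict.getD_insert_self]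
    · rw [pv_setdefault_eq]
      have hxs' : s ≠ x := fun h => hxs h.symm
      have hcc : ∀ (d' : PySem.Dict String Int), (if d.contains x = true then d else d.insert x st).contains s = d.contains s := by
        intro _; split
        · rfl
        · simp [PySem.Dict.contains_insert, hxs']
      rw [PySem.List.index?_cons_of_ne _ hxs]
      by_cases hc2 : d.contains s = true
      · simp only [hcc d, hc2, if_true]
        split
        · rfl
        · simp [PySem.Dict.getD_insert, hxs']
      · simp only [hcc d, hc2]
        cases hidx : PySem.List.index? t s with
        | none => simp
        | some k => simp; omega
lemma pv_pos_eq (all_toks : List String) (s : String) :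
    (pvB_pos all_toks).getD s 0 = pvA_tok all_toks s := by
  rw [pvB_pos, pv_pos_foldl, pvA_tok]
  simp only [PySem.Dict.contains_empty, Bool.false_eq_true, if_false]
  cases hk : PySem.List.index? all_toks s <;> simp

-- B's foldl grouping pass computes pvGroupsAux
lemma pv_fold_groups : ∀ (t : List String) (gs : List (List String)) (g : List String),
    (let st := t.foldl (fun (st : List (List String) × List String) tok =>
        if tok = "AND" then (st.1 ++ [st.2], []) else (st.1, st.2 ++ [tok])) (gs, g)
     if st.2.isEmpty then st.1 else st.1 ++ [st.2]) = gs ++ pvGroupsAux g t := by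
  intro t
  induction t with
  | nil =>
    intro gs g
    cases g <;> simp [pvGroupsAux]
  | cons tok t ih =>
    intro gs g
    by_cases h : tok = "AND"
    · simp only [List.foldl_cons, h, if_true, pvGroupsAux]
      rw [ih (gs ++ [g]) []]
      simp
    · simp only [List.foldl_cons, h, if_false, pvGroupsAux]
      exact ih gs (g ++ [tok])
-- unfolding pvGroupsAux one group at a time, in A's ed-arithmetic
def pvEd (t : List String) : Nat :=
  match PySem.List.index? t "AND" with
  | some k => k
  | none => t.length

lemma pv_groups_cons : ∀ (t g : List String), g ≠ [] ∨ t ≠ [] →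
    pvGroupsAux g t = (g ++ t.take (pvEd t)) :: pvGroupsAux [] (t.drop (pvEd t + 1)) := by
  intro t
  induction t with
  | nil =>
    intro g h
    have hg : g ≠ [] := by tauto
    simp [pvGroupsAux, pvEd, PySem.List.index?_eq_idxOf?, List.idxOf?, hg]
  | cons tok t ih =>
    intro g _
    by_cases h : tok = "AND"
    · subst h
      have : pvEd ("AND" :: t) = 0 := by
        rw [pvEd, PySem.List.index?_cons_self]
      simp [pvGroupsAux, this]
    · have hstep : pvEd (tok :: t) = pvEd t + 1 ∨ (pvEd (tok :: t) = t.length + 1 ∧ pvEd t = t.length) := by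
        rw [pvEd, pvEd, PySem.List.index?_cons_of_ne _ h]
        cases hk : PySem.List.index? t "AND" <;> simp
      simp only [pvGroupsAux, h, ite_false]
      rw [ih (g ++ [tok]) (Or.inl (by simp))]
      rcases hstep with he | ⟨he1, he2⟩
      · rw [he]
        simp
      · rw [he1, he2]
        rw [List.take_succ_cons, List.drop_succ_cons,
          List.take_of_length_le (le_refl t.length)]
        simp
-- A's if-chain operator search equals B's priority findSome?
lemma pv_op_eq (seg : List String) :
    (if "EQL" ∈ seg then PySem.List.index? seg "EQL"
     else if "GT" ∈ seg then PySem.List.index? seg "GT"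
     else if "LT" ∈ seg then PySem.List.index? seg "LT"
     else none) =
    ["EQL", "GT", "LT"].findSome? (fun cand => if cand ∈ seg then PySem.List.index? seg cand else none) := by
  simp only [List.findSome?]
  by_cases h1 : "EQL" ∈ seg
  · rcases hk : PySem.List.index? seg "EQL" with _ | k
    · rw [PySem.List.index?_eq_none_iff] at hk
      exact absurd h1 hk
    · simp [h1]
  · by_cases h2 : "GT" ∈ seg
    · rcases hk : PySem.List.index? seg "GT" with _ | k
      · rw [PySem.List.index?_eq_none_iff] at hk
        exact absurd h2 hk
      · simp [h1, h2]
    · by_cases h3 : "LT" ∈ seg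
      · rcases hk : PySem.List.index? seg "LT" with _ | k
        · rw [PySem.List.index?_eq_none_iff] at hk
          exact absurd h3 hk
        · simp [h1, h2, h3]
      · simp [h1, h2, h3]

-- the core loop equivalence, per query
lemma pv_loop_eq (all_toks : List String) : ∀ (n : Nat) (rest : List String), rest.length ≤ n →
    (∀ g ∈ pvGroupsAux [] rest, ("EQL" ∈ g ∨ "GT" ∈ g ∨ "LT" ∈ g)) →
    pvA_loop all_toks rest = pvB_vals (pvB_pos all_toks) (pvGroupsAux [] rest) := by
  intro n
  induction n with
  | zero =>
    intro rest hlen _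
    have : rest = [] := List.eq_nil_of_length_eq_zero (by omega)
    subst this
    simp [pvA_loop, pvGroupsAux, pvB_vals]
  | succ n ih =>
    intro rest hlen hops
    cases rest with
    | nil => simp [pvA_loop, pvGroupsAux, pvB_vals]
    | cons t ts =>
      rw [pv_groups_cons _ _ (Or.inr (by simp))] at hops ⊢
      simp only [List.nil_append] at hops ⊢
      have hseg := hops _ (List.mem_cons_self ..)
      have htail : ∀ g ∈ pvGroupsAux [] ((t :: ts).drop (pvEd (t :: ts) + 1)),
          ("EQL" ∈ g ∨ "GT" ∈ g ∨ "LT" ∈ g) := fun g hg => hops g (List.mem_cons_of_mem _ hg)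
      have hsome : (if "EQL" ∈ (t :: ts).take (pvEd (t :: ts)) then PySem.List.index? ((t :: ts).take (pvEd (t :: ts))) "EQL"
          else if "GT" ∈ (t :: ts).take (pvEd (t :: ts)) then PySem.List.index? ((t :: ts).take (pvEd (t :: ts))) "GT"
          else if "LT" ∈ (t :: ts).take (pvEd (t :: ts)) then PySem.List.index? ((t :: ts).take (pvEd (t :: ts))) "LT"
          else none).isSome := by
        by_cases h1 : "EQL" ∈ (t :: ts).take (pvEd (t :: ts))
        · simp [h1]
        · by_cases h2 : "GT" ∈ (t :: ts).take (pvEd (t :: ts))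
          · simp [h1, h2]
          · have h3 : "LT" ∈ (t :: ts).take (pvEd (t :: ts)) := by tauto
            simp [h1, h2, h3]
      obtain ⟨op, hop⟩ := Option.isSome_iff_exists.mp hsome
      rw [pvA_loop]
      have hed : (match PySem.List.index? (t :: ts) "AND" with
          | some k => k
          | none => (t :: ts).length) = pvEd (t :: ts) := rfl
      rw [hed, hop]
      rw [pvB_vals, pvB_group, ← pv_op_eq, hop]
      dsimp only
      congr 1
      · apply List.map_congr_left
        intro s _
        exact (pv_pos_eq all_toks s).symm
      · apply ih
        · have : pvEd (t :: ts) + 1 ≥ 1 := by omega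
          simp only [List.length_drop, List.length_cons] at *
          omega
        · exact htail

-- ===== VERDICT (by name: the statement is the Claim_ definition above) =====
theorem generate_gt_where_seq_spec : Claim_equal_generate_gt_where_seq := by
  intro q col query _ hpre
  unfold Spec_generate_gt_where_seq generate_gt_where_seq generate_gt_where_seq_alt
  rw [PySem.List.foldl_append_singleton_eq_map, PySem.List.foldl_append_singleton_eq_map]
  apply List.map_congr_left
  intro x hx
  have hx' := hpre x hx
  rw [pv_fold_groups]
  have htok : (match PySem.List.index? x.2.2 "WHERE" with
      | some i => x.2.2.drop (i + 1)
      | none => x.2.2.drop x.2.2.length) = pvTokens x.2.2 := by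
    rw [pvTokens]
    cases hi : PySem.List.index? x.2.2 "WHERE" <;> simp
  rw [htok, List.nil_append]
  exact pv_loop_eq _ (pvTokens x.2.2).length _ (le_refl _) hx'
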